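-- pv_equiv track=rewrite | github.com/pssnyder/v7p3r-chess-engine | src/v7p3r_tactical_detector.py | _calc_diagonal_mask
-- ===== SOURCE A (Python) =====
-- def _calc_diagonal_mask(square: int) -> int:
--     """Calculate diagonal mask for given square"""
--     rank, file = divmod(square, 8)
--     mask = 0
--
--     # Positive diagonal (up-right, down-left)
--     for i in range(8):
--         r, f = rank + i, file + i
--         if 0 <= r < 8 and 0 <= f < 8:
--             mask |= 1 << (r * 8 + f)
--         r, f = rank - i, file - i
--         if 0 <= r < 8 and 0 <= f < 8:
--             mask |= 1 << (r * 8 + f)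
--
--     return mask
-- ===== SOURCE B (Python) =====
-- def _calc_diagonal_mask(square: int) -> int:
--     """Calculate diagonal mask for given square"""
--     rank, file = divmod(square, 8)
--     diff = file - rank
--     mask = 0
--     for r in range(8):
--         f = r + diff
--         if 0 <= f < 8:
--             mask |= 1 << (r * 8 + f)
--     return mask
-- ===== Notes on version B (the rewrite author's own statement) =====
-- stated objective: simpler
-- what changed: A walks the diagonal in two directions from the square with two bound-checked updates per step; B computes the diagonal invariant diff = file - rank once and makes a single pass over ranks, deriving the file algebraically with one bound check.
import Mathlib
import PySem

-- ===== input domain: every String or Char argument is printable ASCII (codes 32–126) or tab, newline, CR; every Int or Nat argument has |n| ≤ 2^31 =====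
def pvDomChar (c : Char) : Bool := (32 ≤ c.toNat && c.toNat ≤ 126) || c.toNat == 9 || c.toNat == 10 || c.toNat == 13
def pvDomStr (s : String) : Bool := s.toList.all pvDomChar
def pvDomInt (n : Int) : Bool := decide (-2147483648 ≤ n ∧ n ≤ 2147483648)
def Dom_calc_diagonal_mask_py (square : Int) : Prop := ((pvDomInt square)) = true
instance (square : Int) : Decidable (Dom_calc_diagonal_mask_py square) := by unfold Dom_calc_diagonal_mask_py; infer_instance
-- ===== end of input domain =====

-- B replaces A's two-direction offset walk by one pass over ranks using the diagonal invariant f - r = file - rank (simpler: one bound check per step).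

-- ===== PORT A =====
def calc_diagonal_mask_py (square : Int) : Int :=
  let rank := PySem.Int.floordiv square 8
  let file := PySem.Int.mod square 8
  (PySem.List.pyRange 0 8 1).foldl (fun (mask : Int) (i : Int) =>
    let r := rank + i
    let f := file + i
    let mask : Int := if 0 ≤ r ∧ r < 8 ∧ 0 ≤ f ∧ f < 8 then PySem.Int.bor mask ((1 : Int) <<< (r * 8 + f).toNat) else mask
    let r := rank - i
    let f := file - i
    if 0 ≤ r ∧ r < 8 ∧ 0 ≤ f ∧ f < 8 then PySem.Int.bor mask ((1 : Int) <<< (r * 8 + f).toNat) else mask) (0 : Int)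

-- ===== PORT B =====
def calc_diagonal_mask_py_alt (square : Int) : Int :=
  let rank := PySem.Int.floordiv square 8
  let file := PySem.Int.mod square 8
  let diff := file - rank
  (PySem.List.pyRange 0 8 1).foldl (fun (mask : Int) (r : Int) =>
    let f := r + diff
    if 0 ≤ f ∧ f < 8 then PySem.Int.bor mask ((1 : Int) <<< (r * 8 + f).toNat) else mask) (0 : Int)

-- ===== PRECONDITION & SPEC =====
def Spec_calc_diagonal_mask_py (square : Int) (out : Int) : Prop := out = calc_diagonal_mask_py_alt square
instance (square : Int) (out : Int) : Decidable (Spec_calc_diagonal_mask_py square out) := by unfold Spec_calc_diagonal_mask_py; infer_instance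

-- ===== CLAIM (what is proved, stated in full; the proofs are below) =====
def Claim_equal_calc_diagonal_mask_py : Prop := ∀ (square : Int), Dom_calc_diagonal_mask_py square → Spec_calc_diagonal_mask_py square (calc_diagonal_mask_py square)

-- ===== LEMMAS AND PROOFS =====

-- a fold whose step fixes every element of the list returns its initial accumulator
theorem pv_foldl_id {α β : Type} (f : β → α → β) (l : List α) (a : β)
    (h : ∀ x ∈ l, ∀ b, f b x = b) : l.foldl f a = a := by
  induction l generalizing a with
  | nil => rfl
  | cons y ys ih =>
    simp only [List.foldl_cons]
    rw [h y (by simp), ih]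
    intro x hx b
    exact h x (by simp [hx]) b

-- core equivalence, stated over rank and an on-board file
theorem pv_key (rank file : Int) (h0 : 0 ≤ file) (h8 : file < 8) :
    (PySem.List.pyRange 0 8 1).foldl (fun (mask : Int) (i : Int) =>
      let r := rank + i
      let f := file + i
      let mask : Int := if 0 ≤ r ∧ r < 8 ∧ 0 ≤ f ∧ f < 8 then PySem.Int.bor mask ((1 : Int) <<< (r * 8 + f).toNat) else mask
      let r := rank - i
      let f := file - i
      if 0 ≤ r ∧ r < 8 ∧ 0 ≤ f ∧ f < 8 then PySem.Int.bor mask ((1 : Int) <<< (r * 8 + f).toNat) else mask) (0 : Int)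
    = (PySem.List.pyRange 0 8 1).foldl (fun (mask : Int) (r : Int) =>
      let f := r + (file - rank)
      if 0 ≤ f ∧ f < 8 then PySem.Int.bor mask ((1 : Int) <<< (r * 8 + f).toNat) else mask) (0 : Int) := by
  by_cases hd : -7 ≤ rank - file ∧ rank - file ≤ 7
  · obtain ⟨d, rfl⟩ : ∃ d, rank = file + d := ⟨rank - file, by ring⟩
    have hd1 : -7 ≤ d := by omega
    have hd2 : d ≤ 7 := by omega
    interval_cases file <;> interval_cases d <;> decide
  · rw [pv_foldl_id, pv_foldl_id]
    · intro x hx b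
      have hx' : 0 ≤ x ∧ x < 8 := (PySem.List.mem_pyRange_one.mp hx)
      simp only []
      split_ifs with hc
      · omega
      · rfl
    · intro x hx b
      simp only []
      split_ifs with h1 h2 h2
      · omega
      · omega
      · omega
      · rfl

-- ===== VERDICT (by name: the statement is the Claim_ definition above) =====
theorem calc_diagonal_mask_py_spec : Claim_equal_calc_diagonal_mask_py := by
  intro square _
  unfold Spec_calc_diagonal_mask_py calc_diagonal_mask_py calc_diagonal_mask_py_alt
  exact pv_key (PySem.Int.floordiv square 8) (PySem.Int.mod square 8)
    (PySem.Int.mod_nonneg square (by norm_num)) (PySem.Int.mod_lt square (by norm_num))
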